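-- pv_equiv track=rewrite | github.com/4142931/Coding_Test | 24_09_20⚠.py | solution
-- ===== SOURCE A (Python) =====
-- def solution(n):
--     answer = 0
--
--     for i in range(1, n+1):
--         if i == 2 or i == 3:
--             pass
--         elif i % 2 == 0 or i % 3 == 0:
--             answer += 1
--         else:
--             pass
--     return answer
-- ===== SOURCE B (Python) =====
-- def solution(n):
--     # closed-form inclusion-exclusion: multiples of 2 or 3 in [1,n], minus the excluded 2 and 3
--     if n < 4:
--         return 0
--     return n // 2 + n // 3 - n // 6 - 2
-- ===== Notes on version B (the rewrite author's own statement) =====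
-- stated objective: faster
-- what changed: Replaced the O(n) loop over 1..n by a closed-form inclusion-exclusion formula n//2 + n//3 - n//6 - 2 (0 for n < 4).
import Mathlib
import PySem

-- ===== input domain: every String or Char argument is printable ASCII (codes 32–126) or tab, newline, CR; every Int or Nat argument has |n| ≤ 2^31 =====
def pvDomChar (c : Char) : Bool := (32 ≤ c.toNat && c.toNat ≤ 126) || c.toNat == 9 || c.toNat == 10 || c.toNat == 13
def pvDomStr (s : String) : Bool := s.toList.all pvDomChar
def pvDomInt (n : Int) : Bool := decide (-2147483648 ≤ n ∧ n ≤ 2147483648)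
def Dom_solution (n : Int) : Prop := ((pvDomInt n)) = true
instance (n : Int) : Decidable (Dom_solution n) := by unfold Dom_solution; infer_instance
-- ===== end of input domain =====

-- B replaces A's O(n) counting loop by the O(1) inclusion-exclusion formula n//2 + n//3 - n//6 - 2.

-- ===== PORT A =====
-- loop body of A's for-loop (i == 2 or i == 3 → pass; i % 2 == 0 or i % 3 == 0 → answer += 1; else pass)
def pvStep (answer i : Int) : Int :=
  if i == 2 || i == 3 then answer
  else if PySem.Int.mod i 2 == 0 || PySem.Int.mod i 3 == 0 then answer + 1
  else answer

def solution (n : Int) : Int :=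
  (PySem.List.pyRange 1 (n + 1) 1).foldl pvStep 0

-- ===== PORT B =====
def solution_alt (n : Int) : Int :=
  if n < 4 then 0
  else PySem.Int.floordiv n 2 + PySem.Int.floordiv n 3 - PySem.Int.floordiv n 6 - 2

-- ===== PRECONDITION & SPEC =====
def Spec_solution (n : Int) (out : Int) : Prop := out = solution_alt n
instance (n : Int) (out : Int) : Decidable (Spec_solution n out) := by unfold Spec_solution; infer_instance

-- ===== CLAIM (what is proved, stated in full; the proofs are below) =====
def Claim_equal_solution : Prop := ∀ (n : Int), Dom_solution n → Spec_solution n (solution n)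

-- ===== LEMMAS AND PROOFS =====

theorem pvStep_shift (answer i : Int) : pvStep answer i = answer + pvStep 0 i := by
  unfold pvStep; split_ifs <;> simp

theorem solution_succ (n : Int) (h : 1 ≤ n) :
    solution n = solution (n - 1) + pvStep 0 n := by
  unfold solution
  rw [PySem.List.pyRange_one_succ_right h, List.foldl_append]
  have h2 : n - 1 + 1 = n := by ring
  rw [h2]
  simp only [List.foldl]
  exact pvStep_shift _ n

theorem solution_nonpos (n : Int) (h : n ≤ 0) : solution n = 0 := by
  unfold solution
  rw [PySem.List.pyRange_one_eq_nil (by omega)]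
  rfl

theorem pvStep_val (i : Int) (h : 4 ≤ i) :
    pvStep 0 i = (if i % 2 = 0 ∨ i % 3 = 0 then 1 else 0) := by
  unfold pvStep
  rw [PySem.Int.mod_eq_emod_of_pos (a := i) (b := 2) (by omega),
    PySem.Int.mod_eq_emod_of_pos (a := i) (b := 3) (by omega)]
  have h2 : ¬ (i == 2 || i == 3) = true := by
    simp; omega
  rw [if_neg h2]
  by_cases hc : i % 2 = 0 ∨ i % 3 = 0
  · rw [if_pos (by simpa using hc), if_pos hc]; ring
  · rw [if_neg (by simpa using hc), if_neg hc]

theorem solution_formula (m : Nat) :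
    solution (3 + (m : Int)) = (3 + (m : Int)) / 2 + (3 + (m : Int)) / 3 - (3 + (m : Int)) / 6 - 2 := by
  induction m with
  | zero => decide
  | succ k ih =>
    have hk : ((k : Int) + 1) = (((k + 1 : Nat) : Int)) := by push_cast; ring
    have h1 : (3 + ((k + 1 : Nat) : Int)) = (3 + (k : Int)) + 1 := by push_cast; ring
    rw [h1, solution_succ _ (by omega)]
    have h2 : 3 + (k : Int) + 1 - 1 = 3 + (k : Int) := by ring
    rw [h2, ih, pvStep_val _ (by omega)]
    set x : Int := 3 + (k : Int) with hx
    obtain ⟨q, r, hr0, hr6, hxe⟩ : ∃ q r : Int, 0 ≤ r ∧ r < 6 ∧ x = 6 * q + r :=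
      ⟨x / 6, x % 6, by omega, by omega, by omega⟩
    rw [hxe]
    split_ifs with hc <;> interval_cases r <;> omega

theorem solution_eq_alt (n : Int) : solution n = solution_alt n := by
  unfold solution_alt
  by_cases h : n < 4
  · rw [if_pos h]
    by_cases h0 : n ≤ 0
    · exact solution_nonpos n h0
    · interval_cases n <;> decide
  · rw [if_neg h]
    have hm : ∃ m : Nat, n = 3 + (m : Int) := ⟨(n - 3).toNat, by omega⟩
    obtain ⟨m, rfl⟩ := hm
    rw [solution_formula m,
      PySem.Int.floordiv_eq_ediv_of_pos (b := 2) (by omega),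
      PySem.Int.floordiv_eq_ediv_of_pos (b := 3) (by omega),
      PySem.Int.floordiv_eq_ediv_of_pos (b := 6) (by omega)]

-- ===== VERDICT (by name: the statement is the Claim_ definition above) =====
theorem solution_spec : Claim_equal_solution := by
  intro n _
  unfold Spec_solution
  exact solution_eq_alt n
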